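-- pv_equiv track=rewrite | github.com/leynos/wildside | scripts/sync_workspace_members.py | _find_members_array_bounds
-- ===== SOURCE A (Python) =====
-- def _calculate_bracket_depth_change(line: str) -> int:
--     """Compute the net bracket depth delta for a line.
--
--     Parameters
--     ----------
--     line : str
--         A single line of text from the manifest.
--
--     Returns
--     -------
--     int
--         Net change in bracket nesting produced by the line.
--
--     Examples
--     --------
--     >>> _calculate_bracket_depth_change('members = [')
--     1
--     >>> _calculate_bracket_depth_change('    ]')
--     -1
--     """
--
--     return line.count("[") - line.count("]")
--
-- def _find_members_array_bounds(lines: list[str]) -> tuple[int, int, str]: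
--     """Locate the bounds of the workspace members array.
--
--     Parameters
--     ----------
--     lines : list of str
--         Lines from the workspace manifest.
--
--     Returns
--     -------
--     tuple of int and str
--         Start index, end index, and indentation for the members array.
--
--     Raises
--     ------
--     SystemExit
--         If the members array cannot be located in the manifest.
--
--     Examples
--     --------
--     >>> example = ['[workspace]', 'members = [', '    "crate",', ']']
--     >>> _find_members_array_bounds(example)
--     (1, 3, '')
--     """
--
--     start = None
--     indent = ""
--     depth = 0
--     for idx, line in enumerate(lines):
--         stripped = line.lstrip()
--         if start is None:
--             if not stripped.startswith("members"):
--                 continue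
--             start = idx
--             indent = line[: len(line) - len(stripped)]
--             depth = _calculate_bracket_depth_change(line)
--             if depth <= 0:
--                 return start, idx, indent
--             continue
--         depth += _calculate_bracket_depth_change(line)
--         if depth <= 0:
--             return start, idx, indent
--     raise SystemExit("workspace members array not found in Cargo.toml")
-- ===== SOURCE B (Python) =====
-- def _find_members_array_bounds(lines: list[str]) -> tuple[int, int, str]:
--     """Locate the bounds of the workspace members array via a precomputed
--     whole-file prefix-sum array of bracket deltas (no running depth state)."""
--     stripped = [line.lstrip() for line in lines]
--     prefix = []
--     total = 0
--     for line in lines: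
--         total += line.count("[") - line.count("]")
--         prefix.append(total)
--     start = next((i for i, s in enumerate(stripped) if s.startswith("members")), None)
--     if start is None:
--         raise SystemExit("workspace members array not found in Cargo.toml")
--     base = prefix[start - 1] if start > 0 else 0
--     end = next((j for j, p in enumerate(prefix[start:], start) if p - base <= 0), None)
--     if end is None:
--         raise SystemExit("workspace members array not found in Cargo.toml")
--     indent = lines[start][: len(lines[start]) - len(stripped[start])]
--     return start, end, indent
-- ===== Notes on version B (the rewrite author's own statement) =====
-- stated objective: alternative
-- what changed: A streams the file once threading Optional start/indent and a running depth counter through one loop; B instead precomputes a whole-file prefix-sum array of per-line bracket deltas (plus a stripped-lines array), then finds start and end purely by lookups: end is the first j >= start with prefix[j] - prefix[start-1] <= 0, with no running depth state during either search.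
import Mathlib
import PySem

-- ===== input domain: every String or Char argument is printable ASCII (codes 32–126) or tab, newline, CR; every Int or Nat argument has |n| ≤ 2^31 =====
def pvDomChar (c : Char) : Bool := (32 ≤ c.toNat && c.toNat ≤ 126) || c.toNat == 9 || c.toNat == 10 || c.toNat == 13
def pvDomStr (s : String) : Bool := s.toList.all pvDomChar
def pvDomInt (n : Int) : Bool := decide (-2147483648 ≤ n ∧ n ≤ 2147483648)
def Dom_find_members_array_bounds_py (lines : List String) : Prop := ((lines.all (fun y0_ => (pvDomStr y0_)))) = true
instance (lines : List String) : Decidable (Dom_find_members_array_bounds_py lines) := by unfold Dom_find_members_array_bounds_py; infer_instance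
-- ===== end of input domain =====

-- B replaces A's single streaming loop (Optional start + running depth counter) by a
-- precomputed whole-file prefix-sum array of bracket deltas and pure index lookups;
-- objective: alternative. Pre_ excludes exactly the inputs where A raises SystemExit.

-- ===== PORT A =====
-- net bracket depth delta of a line (helper _calculate_bracket_depth_change)
def calcBracketDepthChange (line : String) : Int :=
  (PySem.Str.count line "[" : Int) - (PySem.Str.count line "]" : Int)

-- indentation prefix line[: len(line) - len(line.lstrip())]
def fmabIndent (line : String) : String :=
  PySem.Str.slice line none
    (some ((PySem.Str.len line : Int) - (PySem.Str.len (PySem.Str.lstrip line) : Int)))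

-- A's single loop: state = (idx, start?/indent, depth); indices as Nat, cast at top level
def fmabALoop : List String → Nat → Option (Nat × String) → Int → Option (Nat × Nat × String)
  | [], _, _, _ => none
  | line :: rest, idx, st, depth =>
    match st with
    | none =>
      if PySem.Str.startswith (PySem.Str.lstrip line) "members" then
        let d := calcBracketDepthChange line
        if d ≤ 0 then some (idx, idx, fmabIndent line)
        else fmabALoop rest (idx + 1) (some (idx, fmabIndent line)) d
      else fmabALoop rest (idx + 1) none depth
    | some (s, indent) =>
      let d := depth + calcBracketDepthChange line
      if d ≤ 0 then some (s, idx, indent)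
      else fmabALoop rest (idx + 1) st d

def find_members_array_bounds_py (lines : List String) : Int × Int × String :=
  match fmabALoop lines 0 none 0 with
  | some (s, j, indent) => ((s : Int), (j : Int), indent)
  | none => (0, 0, "")   -- unreachable under Pre_: Python raises SystemExit here

-- ===== PORT B =====
-- the prefix list built by Source B's accumulation loop: running totals of bracket deltas
def fmabPrefix : List String → Int → List Int
  | [], _ => []
  | line :: rest, total =>
    let t := total + ((PySem.Str.count line "[" : Int) - (PySem.Str.count line "]" : Int))
    t :: fmabPrefix rest t

-- first index i with stripped[i].startswith("members") (Source B's first next(...))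
def fmabFindStart : List String → Nat → Option Nat
  | [], _ => none
  | s :: rest, i =>
    if PySem.Str.startswith s "members" then some i else fmabFindStart rest (i + 1)

-- first j ≥ start with prefix[j] - base ≤ 0, scanning prefix[start:] (second next(...))
def fmabFindEnd : List Int → Nat → Int → Option Nat
  | [], _, _ => none
  | p :: rest, j, base =>
    if p - base ≤ 0 then some j else fmabFindEnd rest (j + 1) base

def find_members_array_bounds_py_alt (lines : List String) : Int × Int × String :=
  match fmabFindStart (lines.map PySem.Str.lstrip) 0 with
  | none => (0, 0, "")   -- unreachable under Pre_: Python raises SystemExit here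
  | some start =>
    match fmabFindEnd (PySem.List.slice (fmabPrefix lines 0) (some (start : Int)) none) start
        (if 0 < start then (fmabPrefix lines 0).getD (start - 1) 0 else 0) with
    | none => (0, 0, "")   -- unreachable under Pre_
    | some j =>
      ((start : Int), (j : Int),
        PySem.Str.slice (lines.getD start "") none
          (some ((PySem.Str.len (lines.getD start "") : Int)
            - (PySem.Str.len ((lines.map PySem.Str.lstrip).getD start "") : Int))))

-- ===== PRECONDITION & SPEC =====
def fmabIsMem (l : String) : Bool := PySem.Str.startswith (PySem.Str.lstrip l) "members"
def fmabDelta (l : String) : Int :=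
  (PySem.Str.count l "[" : Int) - (PySem.Str.count l "]" : Int)

-- Pre_ excludes exactly the inputs where A raises SystemExit: there must be a
-- 'members' line, and from the first such line the cumulative bracket delta must
-- reach ≤ 0 at some line.
def Pre_find_members_array_bounds_py (lines : List String) : Prop :=
  ∃ i ∈ List.range lines.length,
    fmabIsMem (lines.getD i "") = true ∧
    (∀ k ∈ List.range i, fmabIsMem (lines.getD k "") = false) ∧
    ∃ j ∈ List.range lines.length,
      i ≤ j ∧ (((lines.drop i).take (j + 1 - i)).map fmabDelta).sum ≤ 0
instance (lines : List String) : Decidable (Pre_find_members_array_bounds_py lines) := by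
  unfold Pre_find_members_array_bounds_py; infer_instance

def pvWitness_find_members_array_bounds_py : List String := ["members = [", "]"]

def Spec_find_members_array_bounds_py (lines : List String) (out : Int × Int × String) : Prop :=
  out = find_members_array_bounds_py_alt lines
instance (lines : List String) (out : Int × Int × String) :
    Decidable (Spec_find_members_array_bounds_py lines out) := by
  unfold Spec_find_members_array_bounds_py; infer_instance

-- ===== CLAIM (what is proved, stated in full; the proofs are below) =====
def Claim_equal_find_members_array_bounds_py : Prop :=
  ∀ (lines : List String), Dom_find_members_array_bounds_py lines →
    Pre_find_members_array_bounds_py lines →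
    Spec_find_members_array_bounds_py lines (find_members_array_bounds_py lines)

-- ===== LEMMAS AND PROOFS =====

-- proof-only helper: A's loop once the start is fixed (running-depth scan)
def fmabScan : List String → Nat → Int → Option Nat
  | [], _, _ => none
  | later :: rest, j, depth =>
    let d := depth + ((PySem.Str.count later "[" : Int) - (PySem.Str.count later "]" : Int))
    if d ≤ 0 then some j else fmabScan rest (j + 1) d

-- proof-only helper: A's version of "first members line", carrying the line itself
def fmabStart : List String → Nat → Option (Nat × String)
  | [], _ => none
  | line :: rest, idx =>
    if PySem.Str.startswith (PySem.Str.lstrip line) "members" then some (idx, line)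
    else fmabStart rest (idx + 1)

-- A's loop after the start was found is the running-depth scan (start/indent tacked on)
theorem fmabALoop_some (ls : List String) : ∀ (idx s : Nat) (indent : String) (depth : Int),
    fmabALoop ls idx (some (s, indent)) depth
      = (fmabScan ls idx depth).map (fun j => (s, j, indent)) := by
  induction ls with
  | nil => intro idx s indent depth; rfl
  | cons line rest ih =>
    intro idx s indent depth
    simp only [fmabALoop, fmabScan, calcBracketDepthChange]
    split_ifs <;> simp [ih]

theorem fmabStart_ge (ls : List String) : ∀ (idx : Nat) (s : Nat) (line : String),
    fmabStart ls idx = some (s, line) → idx ≤ s := by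
  induction ls with
  | nil => intro idx s line h; simp [fmabStart] at h
  | cons l rest ih =>
    intro idx s line h
    simp only [fmabStart] at h
    split_ifs at h with hm
    · simp at h; omega
    · exact Nat.le_of_succ_le (ih (idx + 1) s line h)

-- the found line is ls[s-idx], and s-idx is in range
theorem fmabStart_getD (ls : List String) : ∀ (idx s : Nat) (line : String),
    fmabStart ls idx = some (s, line) →
      s - idx < ls.length ∧ ls.getD (s - idx) "" = line := by
  induction ls with
  | nil => intro idx s line h; simp [fmabStart] at h
  | cons l rest ih =>
    intro idx s line h
    simp only [fmabStart] at h
    split_ifs at h with hm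
    · simp at h; obtain ⟨h1, h2⟩ := h; subst h1 h2; simp
    · have hge := fmabStart_ge rest (idx + 1) s line h
      obtain ⟨hlt, hgd⟩ := ih (idx + 1) s line h
      have h1 : s - idx = (s - (idx + 1)) + 1 := by omega
      constructor
      · simp only [List.length_cons]; omega
      · simpa [h1] using hgd

-- A's loop in search mode: find the start (A-style), then the running-depth scan
theorem fmabALoop_none (ls : List String) : ∀ (idx : Nat) (depth : Int),
    fmabALoop ls idx none depth
      = match fmabStart ls idx with
        | none => none
        | some (s, line) =>
          (fmabScan (ls.drop (s - idx)) s 0).map (fun j => (s, j, fmabIndent line)) := by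
  induction ls with
  | nil => intro idx depth; rfl
  | cons line rest ih =>
    intro idx depth
    by_cases hm : PySem.Str.startswith (PySem.Str.lstrip line) "members" = true
    · simp only [fmabALoop, fmabStart, if_pos hm, Nat.sub_self, List.drop_zero, fmabScan,
        zero_add, calcBracketDepthChange]
      split_ifs with h
      · rfl
      · exact fmabALoop_some rest (idx + 1) idx (fmabIndent line) _
    · simp only [fmabALoop, fmabStart, if_neg hm]
      rw [ih (idx + 1) depth]
      cases hst : fmabStart rest (idx + 1) with
      | none => rfl
      | some p =>
        obtain ⟨s, l⟩ := p
        have hge := fmabStart_ge rest (idx + 1) s l hst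
        have h1 : s - idx = (s - (idx + 1)) + 1 := by omega
        simp only [h1, List.drop_succ_cons]

-- B's start search over the stripped list is A's start search, index only
theorem fmabFindStart_eq (ls : List String) : ∀ (idx : Nat),
    fmabFindStart (ls.map PySem.Str.lstrip) idx = (fmabStart ls idx).map (fun p => p.1) := by
  induction ls with
  | nil => intro idx; rfl
  | cons l rest ih =>
    intro idx
    simp only [List.map_cons, fmabFindStart, fmabStart]
    split_ifs <;> simp [ih]

-- the running-depth scan equals the prefix-sum lookup scan, for any base shift
theorem fmabScan_eq_findEnd (ls : List String) : ∀ (j : Nat) (depth base : Int),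
    fmabScan ls j depth = fmabFindEnd (fmabPrefix ls (depth + base)) j base := by
  induction ls with
  | nil => intro j depth base; rfl
  | cons l rest ih =>
    intro j depth base
    simp only [fmabScan, fmabPrefix, fmabFindEnd]
    have harg : depth + base + ((PySem.Str.count l "[" : Int) - (PySem.Str.count l "]" : Int)) - base
        = depth + ((PySem.Str.count l "[" : Int) - (PySem.Str.count l "]" : Int)) := by ring
    rw [harg]
    split_ifs with h
    · rfl
    · have : depth + ((PySem.Str.count l "[" : Int) - (PySem.Str.count l "]" : Int)) + base
          = depth + base + ((PySem.Str.count l "[" : Int) - (PySem.Str.count l "]" : Int)) := by ring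
      rw [ih (j + 1) _ base, this]

-- dropping n entries of the prefix list restarts it at the partial sum of the first n deltas
theorem fmabPrefix_drop (ls : List String) : ∀ (n : Nat) (t : Int),
    (fmabPrefix ls t).drop n = fmabPrefix (ls.drop n) (t + ((ls.take n).map fmabDelta).sum) := by
  induction ls with
  | nil => intro n t; simp [fmabPrefix]
  | cons l rest ih =>
    intro n t
    cases n with
    | zero => simp
    | succ m =>
      simp only [fmabPrefix, List.drop_succ_cons, List.take_succ_cons, List.map_cons,
        List.sum_cons]
      rw [ih m]
      congr 1
      simp [fmabDelta]; ring
  -- the n-th prefix entry is the partial sum of the first n+1 deltas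
theorem fmabPrefix_getD (ls : List String) : ∀ (n : Nat) (t : Int), n < ls.length →
    (fmabPrefix ls t).getD n 0 = t + ((ls.take (n + 1)).map fmabDelta).sum := by
  induction ls with
  | nil => intro n t h; simp at h
  | cons l rest ih =>
    intro n t h
    cases n with
    | zero => simp [fmabPrefix, fmabDelta]
    | succ m =>
      simp only [List.length_cons] at h
      simp only [fmabPrefix, List.getD_cons_succ, List.take_succ_cons, List.map_cons,
        List.sum_cons]
      rw [ih m _ (by omega)]
      simp [fmabDelta]; ring

-- ===== VERDICT (by name: the statement is the Claim_ definition above) =====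
theorem find_members_array_bounds_py_spec : Claim_equal_find_members_array_bounds_py := by
  intro lines _ _
  show find_members_array_bounds_py lines = find_members_array_bounds_py_alt lines
  unfold find_members_array_bounds_py find_members_array_bounds_py_alt
  rw [fmabALoop_none lines 0 0, fmabFindStart_eq lines 0]
  cases hst : fmabStart lines 0 with
  | none => rfl
  | some p =>
    obtain ⟨s, line⟩ := p
    obtain ⟨hlt, hgd⟩ := fmabStart_getD lines 0 s line hst
    simp only [Nat.sub_zero] at hlt hgd
    have hbase : (if 0 < s then (fmabPrefix lines 0).getD (s - 1) 0 else 0)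
        = ((lines.take s).map fmabDelta).sum := by
      split_ifs with hs
      · rw [fmabPrefix_getD lines (s - 1) 0 (by omega)]
        have : s - 1 + 1 = s := by omega
        rw [this]; ring
      · have : s = 0 := by omega
        simp [this]
    have hdrop : PySem.List.slice (fmabPrefix lines 0) (some (s : Int)) none
        = fmabPrefix (lines.drop s) (0 + ((lines.take s).map fmabDelta).sum) := by
      rw [PySem.List.slice_from_natCast]
      exact fmabPrefix_drop lines s 0
    have hscan : fmabScan (lines.drop s) s 0
        = fmabFindEnd (PySem.List.slice (fmabPrefix lines 0) (some (s : Int)) none) s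
            (if 0 < s then (fmabPrefix lines 0).getD (s - 1) 0 else 0) := by
      rw [hdrop, hbase, fmabScan_eq_findEnd (lines.drop s) s 0 _]
    have hstrip : (lines.map PySem.Str.lstrip).getD s "" = PySem.Str.lstrip line := by
      rw [List.getD_eq_getElem _ _ (by simpa using hlt)]
      simp only [List.getElem_map]
      rw [← hgd, List.getD_eq_getElem _ _ hlt]
    simp only [Option.map_some, Nat.sub_zero, ← hscan, hgd, hstrip, fmabIndent]
    cases fmabScan (lines.drop s) s 0 <;> rfl
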